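-- pv_equiv track=rewrite | github.com/XR-Y/AutomatedTest2021 | SIT.py | depDistance
-- ===== SOURCE A (Python) =====
-- def depDistance(graph1, graph2):
--     counts1 = dict()
--     for i in graph1:
--         counts1[i[1]] = counts1.get(i[1], 0) + 1
--     counts2 = dict()
--     for i in graph2:
--         counts2[i[1]] = counts2.get(i[1], 0) + 1
--     all_deps = set(list(counts1.keys()) + list(counts2.keys()))
--     diffs = 0
--     for dep in all_deps:
--         diffs += abs(counts1.get(dep, 0) - counts2.get(dep, 0))
--     return diffs
-- ===== SOURCE B (Python) =====
-- def depDistance(graph1, graph2):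
--     deps1 = [i[1] for i in graph1]
--     deps2 = [i[1] for i in graph2]
--     overlap = sum(min(deps1.count(d), deps2.count(d)) for d in set(deps1))
--     return len(deps1) + len(deps2) - 2 * overlap
-- ===== Notes on version B (the rewrite author's own statement) =====
-- stated objective: alternative
-- what changed: B builds no frequency dictionaries at all: it extracts the two dependency-type lists, computes overlap = sum of min(deps1.count(d), deps2.count(d)) over the distinct deps of graph1 via direct list counting, and returns len(deps1)+len(deps2)-2*overlap, using the identity |a-b| = a+b-2*min(a,b).
import Mathlib
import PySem

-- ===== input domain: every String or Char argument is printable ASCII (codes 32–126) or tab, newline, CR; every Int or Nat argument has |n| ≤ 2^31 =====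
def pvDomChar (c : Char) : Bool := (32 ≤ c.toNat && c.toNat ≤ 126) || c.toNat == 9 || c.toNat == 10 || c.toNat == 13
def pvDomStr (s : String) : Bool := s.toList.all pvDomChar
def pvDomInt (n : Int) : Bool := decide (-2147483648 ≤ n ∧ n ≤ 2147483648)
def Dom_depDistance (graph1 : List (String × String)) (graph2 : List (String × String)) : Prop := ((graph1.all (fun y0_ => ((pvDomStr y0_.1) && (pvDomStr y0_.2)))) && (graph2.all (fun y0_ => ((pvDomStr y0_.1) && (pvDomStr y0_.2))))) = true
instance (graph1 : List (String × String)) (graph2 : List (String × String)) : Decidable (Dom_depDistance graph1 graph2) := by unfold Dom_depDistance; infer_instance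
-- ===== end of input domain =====

-- B builds no frequency dictionaries: it computes overlap = sum of min(count in deps1, count in deps2)
-- over the distinct deps of graph1 by direct list counting, and returns len1+len2-2*overlap,
-- via the identity |a-b| = a+b-2*min(a,b) (objective: alternative decomposition).

-- ===== PORT A =====
def depDistance (graph1 : List (String × String)) (graph2 : List (String × String)) : Int :=
  let counts1 : PySem.Dict String Int :=
    graph1.foldl (fun d i => d.insert i.2 (d.getD i.2 0 + 1)) PySem.Dict.empty
  let counts2 : PySem.Dict String Int :=
    graph2.foldl (fun d i => d.insert i.2 (d.getD i.2 0 + 1)) PySem.Dict.empty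
  let allDeps : PySem.Set String := PySem.Set.ofList (counts1.keys ++ counts2.keys)
  allDeps.foldl (fun diffs dep => diffs + |counts1.getD dep 0 - counts2.getD dep 0|) 0

-- ===== PORT B =====
def depDistance_alt (graph1 : List (String × String)) (graph2 : List (String × String)) : Int :=
  let deps1 : List String := graph1.map (fun i => i.2)
  let deps2 : List String := graph2.map (fun i => i.2)
  let overlap : Int :=
    ((PySem.Set.ofList deps1).map
      (fun d => min ((PySem.List.count deps1 d : Nat) : Int) ((PySem.List.count deps2 d : Nat) : Int))).sum
  (deps1.length : Int) + (deps2.length : Int) - 2 * overlap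

-- ===== PRECONDITION & SPEC =====
def Spec_depDistance (graph1 : List (String × String)) (graph2 : List (String × String)) (out : Int) : Prop := out = depDistance_alt graph1 graph2
instance (graph1 : List (String × String)) (graph2 : List (String × String)) (out : Int) : Decidable (Spec_depDistance graph1 graph2 out) := by unfold Spec_depDistance; infer_instance

-- ===== CLAIM =====
def Claim_equal_depDistance : Prop := ∀ (graph1 : List (String × String)) (graph2 : List (String × String)), Dom_depDistance graph1 graph2 → Spec_depDistance graph1 graph2 (depDistance graph1 graph2)

-- ===== LEMMAS AND PROOFS =====
theorem counter_of_graph (g : List (String × String)) :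
    g.foldl (fun d i => d.insert i.2 (d.getD i.2 0 + 1)) PySem.Dict.empty
      = PySem.Dict.counter (g.map Prod.snd) := by
  rw [← PySem.Dict.foldl_insert_getD_add_one_eq_counter, List.foldl_map]

theorem A_val (graph1 graph2 : List (String × String)) :
    depDistance graph1 graph2 =
      ((PySem.Set.ofList (PySem.Set.ofList (graph1.map Prod.snd) ++ PySem.Set.ofList (graph2.map Prod.snd))).map
        (fun k => |((graph1.map Prod.snd).count k : Int) - ((graph2.map Prod.snd).count k : Int)|)).sum := by
  simp only [depDistance, counter_of_graph, PySem.Dict.keys_counter, PySem.Dict.getD_counter]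
  rw [PySem.List.foldl_add]
  simp

theorem B_val (graph1 graph2 : List (String × String)) :
    depDistance_alt graph1 graph2 =
      ((graph1.map Prod.snd).length : Int) + ((graph2.map Prod.snd).length : Int) - 2 *
      ((PySem.Set.ofList (graph1.map Prod.snd)).map
        (fun k => min ((graph1.map Prod.snd).count k : Int) ((graph2.map Prod.snd).count k : Int))).sum := by
  simp only [depDistance_alt, PySem.List.count_eq]

theorem pv_sum_map_eq_of_nodup {α : Type} [DecidableEq α] (K K' : List α) (f : α → Int)
    (hK : K.Nodup) (hK' : K'.Nodup) (hm : ∀ x, x ∈ K ↔ x ∈ K') :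
    (K.map f).sum = (K'.map f).sum :=
  (((List.perm_ext_iff_of_nodup hK hK').2 hm).map f).sum_eq

theorem pv_sum_map_filter_of_zero {α : Type} (K : List α) (p : α → Bool) (f : α → Int)
    (h : ∀ k ∈ K, p k = false → f k = 0) :
    ((K.filter p).map f).sum = (K.map f).sum := by
  induction K with
  | nil => rfl
  | cons a t ih =>
    have ih' := ih (fun k hk => h k (List.mem_cons_of_mem _ hk))
    by_cases hp : p a = true
    · simp [hp, ih']
    · have hz : f a = 0 := h a (List.mem_cons_self ..) (by simpa using hp)
      simp [hp, ih', hz]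

theorem pv_sum_count_int (K L : List String) (hK : K.Nodup) (hsub : ∀ x ∈ L, x ∈ K) :
    (K.map (fun k => (L.count k : Int))).sum = (L.length : Int) := by
  have h1 : ((K.filter (fun k => L.contains k)).map (fun k => (L.count k : Int))).sum
      = (K.map (fun k => (L.count k : Int))).sum := by
    refine pv_sum_map_filter_of_zero K _ _ (fun k _ hk => ?_)
    have : k ∉ L := by simpa using hk
    simp [List.count_eq_zero_of_not_mem this]
  have h2 : ((K.filter (fun k => L.contains k)).map (fun k => (L.count k : Int))).sum
      = (L.dedup.map (fun k => (L.count k : Int))).sum := by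
    refine pv_sum_map_eq_of_nodup _ _ _ (hK.filter _) L.nodup_dedup (fun x => ?_)
    simp only [List.mem_filter, List.mem_dedup, List.contains_iff_mem]
    exact ⟨fun h => h.2, fun h => ⟨hsub x h, h⟩⟩
  have h3 : (L.dedup.map (fun k => (L.count k : Int))).sum = (L.length : Int) := by
    rw [show (fun k => ((L.count k : Nat) : Int)) = ((Nat.cast : Nat → Int) ∘ fun k => L.count k) from rfl,
        ← List.map_map, ← Nat.cast_list_sum, List.sum_map_count_dedup_eq_length]
  rw [← h1, h2, h3]

theorem pv_abs_decomp (K : List String) (f g : String → Int) :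
    (K.map (fun k => |f k - g k|)).sum
      = (K.map f).sum + (K.map g).sum - 2 * (K.map (fun k => min (f k) (g k))).sum := by
  induction K with
  | nil => simp
  | cons a t ih =>
    have hpt : |f a - g a| = f a + g a - 2 * min (f a) (g a) := by
      rcases le_total (f a) (g a) with h | h
      · rw [abs_of_nonpos (by omega), min_eq_left h]; ring
      · rw [abs_of_nonneg (by omega), min_eq_right h]; ring
    simp only [List.map_cons, List.sum_cons, ih, hpt]; ring

theorem depDistance_eq (graph1 graph2 : List (String × String)) :
    depDistance graph1 graph2 = depDistance_alt graph1 graph2 := by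
  rw [A_val, B_val]
  set L1 := graph1.map Prod.snd with hL1
  set L2 := graph2.map Prod.snd with hL2
  set S : List String := PySem.Set.ofList (PySem.Set.ofList L1 ++ PySem.Set.ofList L2) with hS
  have hSnd : S.Nodup := PySem.Set.nodup_ofList _
  have hmemS : ∀ x, x ∈ S ↔ x ∈ L1 ∨ x ∈ L2 := by
    intro x; simp [hS, PySem.Set.mem_ofList]
  rw [pv_abs_decomp]
  have h1 : (S.map (fun k => (L1.count k : Int))).sum = (L1.length : Int) :=
    pv_sum_count_int S L1 hSnd (fun x hx => (hmemS x).2 (Or.inl hx))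
  have h2 : (S.map (fun k => (L2.count k : Int))).sum = (L2.length : Int) :=
    pv_sum_count_int S L2 hSnd (fun x hx => (hmemS x).2 (Or.inr hx))
  have h3 : (S.map (fun k => min (L1.count k : Int) (L2.count k : Int))).sum
      = ((PySem.Set.ofList L1).map
          (fun k => min (L1.count k : Int) (L2.count k : Int))).sum := by
    have hz : ((S.filter (fun k => L1.contains k)).map
          (fun k => min (L1.count k : Int) (L2.count k : Int))).sum
        = (S.map (fun k => min (L1.count k : Int) (L2.count k : Int))).sum := by
      refine pv_sum_map_filter_of_zero S _ _ (fun k _ hk => ?_)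
      have : k ∉ L1 := by simpa using hk
      rw [List.count_eq_zero_of_not_mem this]
      exact min_eq_left (by positivity)
    rw [← hz]
    refine pv_sum_map_eq_of_nodup _ _ _ (hSnd.filter _) (PySem.Set.nodup_ofList L1) (fun x => ?_)
    simp only [List.mem_filter, hmemS, PySem.Set.mem_ofList, List.contains_iff_mem]
    exact ⟨fun h => h.2, fun h => ⟨Or.inl h, h⟩⟩
  rw [h1, h2, h3]

-- ===== VERDICT =====
theorem depDistance_spec : Claim_equal_depDistance := by
  intro graph1 graph2 _
  unfold Spec_depDistance
  exact depDistance_eq graph1 graph2
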